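-- pv_equiv track=rewrite | github.com/GitbertFrank/Python | fun stuff i guess/AdventOfCode/2024/Day 2/Red-Nosed Reports.py | Linesafe
-- ===== SOURCE A (Python) =====
-- def Linesafe(line):
--     isdecreasing = True
--     isincreasing = True
--     for i in range(len(line) - 1):
--         if line[i] > line[i + 1] and 0 < abs(line[i] - line[i + 1])< 4:
--             if isdecreasing == True:
--                 isdecreasing = True
--         else: isdecreasing = False
--         if line[i] < line[i + 1] and 0 < abs(line[i] - line[i + 1])< 4 and isdecreasing == False:
--             if isincreasing == True:
--                 isincreasing = True
--         else: isincreasing = False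
--     if isincreasing == False and isdecreasing == False: return False
--     return True
-- ===== SOURCE B (Python) =====
-- def Linesafe(line):
--     def mono(i, j, lo, hi):
--         # True iff every adjacent step inside line[i..j] lies in [lo, hi]
--         if j - i < 1:
--             return True
--         if j - i == 1:
--             d = line[j] - line[i]
--             return lo <= d <= hi
--         m = (i + j) // 2
--         return mono(i, m, lo, hi) and mono(m, j, lo, hi)
--     n = len(line)
--     return mono(0, n - 1, 1, 3) or mono(0, n - 1, -3, -1)
-- ===== Notes on version B (the rewrite author's own statement) =====
-- stated objective: alternative
-- what changed: Replaces A's stateful left-to-right scan with two interdependent boolean flags by a divide-and-conquer recursion that splits the index range at its midpoint and checks each half's adjacent steps against a [lo,hi] bound, combining the two directions with a final disjunction.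
import Mathlib
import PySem

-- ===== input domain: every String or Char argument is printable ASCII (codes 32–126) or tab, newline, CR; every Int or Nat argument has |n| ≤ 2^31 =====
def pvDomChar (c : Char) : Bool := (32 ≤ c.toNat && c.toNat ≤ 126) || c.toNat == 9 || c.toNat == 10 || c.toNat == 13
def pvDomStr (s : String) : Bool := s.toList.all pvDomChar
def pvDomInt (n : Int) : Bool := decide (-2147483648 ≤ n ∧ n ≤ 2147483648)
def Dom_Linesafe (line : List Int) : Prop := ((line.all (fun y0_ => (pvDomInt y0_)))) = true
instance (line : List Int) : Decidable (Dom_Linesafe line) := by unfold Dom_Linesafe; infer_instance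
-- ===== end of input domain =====

-- B replaces A's stateful one-pass flag scan by a divide-and-conquer recursion that
-- splits the index range at its midpoint and bounds each half's adjacent steps (objective: alternative).


-- ===== PORT A =====
-- for i in range(len(line)-1): update (isdecreasing, isincreasing) exactly as A does
def Linesafe (line : List Int) : Bool :=
  let st := (PySem.List.pyRange 0 ((line.length : Int) - 1) 1).foldl
    (fun (st : Bool × Bool) i =>
      let a := PySem.List.pyGetD line i 0
      let b := PySem.List.pyGetD line (i + 1) 0
      let isdecreasing := if a > b ∧ 0 < |a - b| ∧ |a - b| < 4 then st.1 else false
      let isincreasing :=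
        if a < b ∧ 0 < |a - b| ∧ |a - b| < 4 ∧ isdecreasing = false then st.2 else false
      (isdecreasing, isincreasing)) (true, true)
  if st.2 = false ∧ st.1 = false then false else true

-- ===== PORT B =====
-- helper mono(i, j, lo, hi) of Source B: divide and conquer on the index interval [i, j].
-- line[j]/line[i] are ported as pyGetD with default 0: Source B only reaches the subtraction
-- with 0 ≤ i < j < len(line), where the default is never used (exact there).
def pvMono (line : List Int) (i j lo hi : Int) : Bool :=
  if j - i < 1 then true
  else if j - i = 1 then
    decide (lo ≤ PySem.List.pyGetD line j 0 - PySem.List.pyGetD line i 0 ∧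
            PySem.List.pyGetD line j 0 - PySem.List.pyGetD line i 0 ≤ hi)
  else
    pvMono line i (PySem.Int.floordiv (i + j) 2) lo hi &&
    pvMono line (PySem.Int.floordiv (i + j) 2) j lo hi
termination_by (j - i).toNat
decreasing_by
  all_goals rw [PySem.Int.floordiv_eq_ediv_of_pos (by omega)]; omega

def Linesafe_alt (line : List Int) : Bool :=
  pvMono line 0 ((line.length : Int) - 1) 1 3 || pvMono line 0 ((line.length : Int) - 1) (-3) (-1)

-- ===== PRECONDITION & SPEC =====
def Spec_Linesafe (line : List Int) (out : Bool) : Prop := out = Linesafe_alt line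
instance (line : List Int) (out : Bool) : Decidable (Spec_Linesafe line out) := by unfold Spec_Linesafe; infer_instance

-- ===== CLAIM (what is proved, stated in full; the proofs are below) =====
def Claim_equal_Linesafe : Prop := ∀ (line : List Int), Dom_Linesafe line → Spec_Linesafe line (Linesafe line)

-- ===== LEMMAS AND PROOFS =====

-- A's loop body as a function of the adjacent pair
def pvStep (st : Bool × Bool) (p : Int × Int) : Bool × Bool :=
  let isdecreasing := if p.1 > p.2 ∧ 0 < |p.1 - p.2| ∧ |p.1 - p.2| < 4 then st.1 else false
  let isincreasing :=
    if p.1 < p.2 ∧ 0 < |p.1 - p.2| ∧ |p.1 - p.2| < 4 ∧ isdecreasing = false then st.2 else false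
  (isdecreasing, isincreasing)

def pvDec (p : Int × Int) : Bool := decide (p.1 > p.2 ∧ 0 < |p.1 - p.2| ∧ |p.1 - p.2| < 4)
def pvInc (p : Int × Int) : Bool := decide (p.1 < p.2 ∧ 0 < |p.1 - p.2| ∧ |p.1 - p.2| < 4)

lemma pvStep_eq (st : Bool × Bool) (p : Int × Int) :
    pvStep st p = (st.1 && pvDec p, st.2 && (pvInc p && !(st.1 && pvDec p))) := by
  obtain ⟨d, i⟩ := st
  simp only [pvStep, pvDec, pvInc]
  by_cases hd : p.1 > p.2 ∧ 0 < |p.1 - p.2| ∧ |p.1 - p.2| < 4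
  · rw [if_pos hd, decide_eq_true hd]
    have hri : ¬ (p.1 < p.2 ∧ 0 < |p.1 - p.2| ∧ |p.1 - p.2| < 4) := fun h => lt_asymm hd.1 h.1
    rw [decide_eq_false hri]
    cases d
    · rw [if_neg (fun h => hri ⟨h.1, h.2.1, h.2.2.1⟩)]
      simp
    · rw [if_neg (fun h => by simpa using h.2.2.2)]
      simp
  · rw [if_neg hd, decide_eq_false hd]
    by_cases hi : p.1 < p.2 ∧ 0 < |p.1 - p.2| ∧ |p.1 - p.2| < 4
    · rw [if_pos ⟨hi.1, hi.2.1, hi.2.2, rfl⟩, decide_eq_true hi]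
      simp
    · rw [if_neg (fun h => hi ⟨h.1, h.2.1, h.2.2.1⟩), decide_eq_false hi]
      simp

lemma pvDec_not_inc (p : Int × Int) (h : pvDec p = true) : pvInc p = false := by
  simp [pvDec, pvInc] at *
  omega

lemma pvStep_fst (ps : List (Int × Int)) (d i : Bool) :
    (ps.foldl pvStep (d, i)).1 = (d && ps.all pvDec) := by
  induction ps generalizing d i with
  | nil => simp
  | cons p t ih =>
    simp only [List.foldl_cons, pvStep_eq, List.all_cons]
    rw [ih, Bool.and_assoc]

lemma pvStep_snd_false (ps : List (Int × Int)) (i : Bool) :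
    (ps.foldl pvStep (false, i)).2 = (i && ps.all pvInc) := by
  induction ps generalizing i with
  | nil => simp
  | cons p t ih =>
    simp only [List.foldl_cons, pvStep_eq, List.all_cons, Bool.false_and, Bool.not_false,
      Bool.and_true]
    rw [ih, Bool.and_assoc]

lemma pvStep_snd_tf (ps : List (Int × Int)) :
    (ps.foldl pvStep (true, false)).2 = false := by
  induction ps with
  | nil => rfl
  | cons p t ih =>
    simp only [List.foldl_cons, pvStep_eq, Bool.true_and, Bool.false_and]
    cases hd : pvDec p
    · simpa using pvStep_snd_false t false
    · exact ih

lemma pvStep_snd_tt (ps : List (Int × Int)) :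
    (ps.foldl pvStep (true, true)).2 = ps.all pvInc := by
  cases ps with
  | nil => rfl
  | cons p t =>
    simp only [List.foldl_cons, pvStep_eq, Bool.true_and, List.all_cons]
    cases hd : pvDec p
    · simpa using pvStep_snd_false t (pvInc p)
    · have hi := pvDec_not_inc p hd
      simp only [hi, Bool.not_true, Bool.and_false, Bool.false_and]
      exact pvStep_snd_tf t

-- the indexed range view of A's loop equals the adjacent-pair list
lemma pvPairs_eq (l : List Int) :
    (List.range (l.length - 1)).map (fun k => (l.getD k 0, l.getD (k + 1) 0)) =
      l.zip l.tail := by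
  apply List.ext_getElem
  · simp only [List.length_map, List.length_range, List.length_zip, List.length_tail]; omega
  · intro n h1 h2
    have hn : n + 1 < l.length := by simp at h1; omega
    simp [List.getElem_zip, List.getD_eq_getElem?_getD,
      List.getElem?_eq_getElem (show n < l.length by omega),
      List.getElem?_eq_getElem hn, List.getElem_tail]

-- the adjacent-step check for an interval, as B's recursion computes it
def pvChk (line : List Int) (lo hi : Int) (k : Nat) : Bool :=
  decide (lo ≤ line.getD (k + 1) 0 - line.getD k 0 ∧ line.getD (k + 1) 0 - line.getD k 0 ≤ hi)

-- B's divide-and-conquer on [i, j] equals the flat check of every adjacent index in [i, j)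
lemma pvMono_eq (line : List Int) (lo hi : Int) (i j : Nat) (hij : i ≤ j) :
    pvMono line (i : Int) (j : Int) lo hi = (List.range' i (j - i)).all (pvChk line lo hi) := by
  generalize hd : j - i = d
  induction d using Nat.strong_induction_on generalizing i j with
  | _ d ih =>
  unfold pvMono
  rcases Nat.lt_or_ge d 2 with h2 | h2
  · interval_cases d
    · have hj : j = i := by omega
      subst hj
      rw [if_pos (by omega)]
      simp
    · have hj : j = i + 1 := by omega
      subst hj
      rw [if_neg (by push_cast; omega), if_pos (by push_cast; omega)]
      rw [List.range'_one]
      simp only [List.all_cons, List.all_nil, Bool.and_true, pvChk, PySem.List.pyGetD_natCast]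
  · rw [if_neg (by omega), if_neg (by omega)]
    have hm : PySem.Int.floordiv ((i : Int) + (j : Int)) 2 = (((i + j) / 2 : Nat) : Int) := by
      have : ((i : Int) + (j : Int)) = ((i + j : Nat) : Int) := by push_cast; ring
      rw [this]
      exact_mod_cast PySem.Int.floordiv_natCast (i + j) 2
    set m : Nat := (i + j) / 2 with hmdef
    have hbnd : i + 1 ≤ m ∧ m + 1 ≤ j := by omega
    rw [hm, ih (m - i) (by omega) i m (by omega) rfl, ih (j - m) (by omega) m j (by omega) rfl,
      ← hd]
    have h := @List.range'_append i (m - i) (j - m) 1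
    rw [one_mul, show i + (m - i) = m from by omega] at h
    rw [show j - i = (m - i) + (j - m) from by omega, ← h, List.all_append]

-- the flat range check equals the two aggregate forms over the adjacent-pair list
lemma pvAlt_eq (line : List Int) (lo hi : Int) :
    pvMono line 0 ((line.length : Int) - 1) lo hi
      = (line.zip line.tail).all (fun p => decide (lo ≤ p.2 - p.1 ∧ p.2 - p.1 ≤ hi)) := by
  cases line with
  | nil =>
    unfold pvMono
    rw [if_pos (by norm_num)]
    rfl
  | cons a t =>
    rw [show (((a :: t).length : Int) - 1) = ((t.length : Nat) : Int) from by simp,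
      show ((0 : Int)) = ((0 : Nat) : Int) from rfl,
      pvMono_eq _ _ _ 0 t.length (Nat.zero_le _), Nat.sub_zero, ← List.range_eq_range',
      show t.length = (a :: t).length - 1 from by simp, ← pvPairs_eq, List.all_map]
    have hfun : pvChk (a :: t) lo hi =
        ((fun p : Int × Int => decide (lo ≤ p.2 - p.1 ∧ p.2 - p.1 ≤ hi)) ∘
          fun k => ((a :: t).getD k 0, (a :: t).getD (k + 1) 0)) := by
      funext k
      rfl
    rw [hfun]

theorem pv_main (line : List Int) : Linesafe line = Linesafe_alt line := by
  have hB : Linesafe_alt line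
      = ((line.zip line.tail).all (fun p => decide ((1:Int) ≤ p.2 - p.1 ∧ p.2 - p.1 ≤ 3))
        || (line.zip line.tail).all (fun p => decide ((-3:Int) ≤ p.2 - p.1 ∧ p.2 - p.1 ≤ -1))) := by
    unfold Linesafe_alt
    rw [pvAlt_eq, pvAlt_eq]
  rw [hB]
  unfold Linesafe
  have hR : PySem.List.pyRange 0 ((line.length : Int) - 1) 1 =
      (List.range (line.length - 1)).map (fun k : Nat => (k : Int)) := by
    rw [PySem.List.pyRange_one]
    have h1 : (((line.length : Int) - 1) - 0).toNat = line.length - 1 := by omega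
    rw [h1]
    exact List.map_congr_left (fun k _ => by omega)
  rw [hR, List.foldl_map]
  rw [List.foldl_ext _ (fun st k => pvStep st (line.getD k 0, line.getD (k + 1) 0)) _
    (by
      intro st k _
      have h1 : ((k : Int) + 1) = ((k + 1 : Nat) : Int) := by push_cast; ring
      simp only [h1, PySem.List.pyGetD_natCast, pvStep])]
  rw [← List.foldl_map, pvPairs_eq]
  have hfst := pvStep_fst (line.zip line.tail) true true
  have hsnd := pvStep_snd_tt (line.zip line.tail)
  rw [Bool.true_and] at hfst
  have hdec : pvDec = (fun p : Int × Int => decide ((-3:Int) ≤ p.2 - p.1 ∧ p.2 - p.1 ≤ -1)) := by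
    funext p
    simp only [pvDec, decide_eq_decide]
    rcases abs_cases (p.1 - p.2) with ⟨he, h0⟩ | ⟨he, h0⟩ <;> rw [he] <;> omega
  have hinc : pvInc = (fun p : Int × Int => decide ((1:Int) ≤ p.2 - p.1 ∧ p.2 - p.1 ≤ 3)) := by
    funext p
    simp only [pvInc, decide_eq_decide]
    rcases abs_cases (p.1 - p.2) with ⟨he, h0⟩ | ⟨he, h0⟩ <;> rw [he] <;> omega
  rw [hdec] at hfst
  rw [hinc] at hsnd
  simp only [hfst, hsnd]
  cases (line.zip line.tail).all (fun p => decide ((1:Int) ≤ p.2 - p.1 ∧ p.2 - p.1 ≤ 3)) <;>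
    cases (line.zip line.tail).all (fun p => decide ((-3:Int) ≤ p.2 - p.1 ∧ p.2 - p.1 ≤ -1)) <;>
    simp

-- ===== VERDICT (by name: the statement is the Claim_ definition above) =====
theorem Linesafe_spec : Claim_equal_Linesafe := by
  intro line _
  unfold Spec_Linesafe
  exact pv_main line
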